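-- pv_equiv track=rewrite | github.com/jamwal69/sql | sqlinjector/modules/steganography.py | _dna_encode
-- ===== SOURCE A (Python) =====
-- def _dna_encode(data: str) -> str:
--     """DNA sequence encoding (A,T,G,C)"""
--     # Map binary to DNA bases
--     dna_mapping = {'00': 'A', '01': 'T', '10': 'G', '11': 'C'}
--
--     # Convert to binary
--     binary_data = ''.join(format(ord(c), '08b') for c in data)
--
--     # Pad to even length
--     if len(binary_data) % 2 != 0:
--         binary_data += '0'
--
--     # Convert to DNA sequence
--     dna_sequence = ''
--     for i in range(0, len(binary_data), 2):
--         dna_sequence += dna_mapping[binary_data[i:i+2]]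
--
--     return f"DNA_{dna_sequence}"
-- ===== SOURCE B (Python) =====
-- def _dna_encode(data: str) -> str:
--     """DNA sequence encoding (A,T,G,C): single pass, bit arithmetic per char,
--     no intermediate binary string."""
--     bases = "ATGC"
--     out = []
--     for c in data:
--         n = ord(c)
--         out.append(bases[(n >> 6) & 3] + bases[(n >> 4) & 3]
--                    + bases[(n >> 2) & 3] + bases[n & 3])
--     return "DNA_" + "".join(out)
-- ===== Notes on version B (the rewrite author's own statement) =====
-- stated objective: faster
-- what changed: Replaces A's two passes of different granularity (build one big intermediate binary string from 8-bit formats of each character, then rescan it in 2-bit slices through a dict) with a single character-level pass that extracts each character's four 2-bit groups by shift/mask arithmetic and indexes a 4-char base string, joining once at the end.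
import Mathlib
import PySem

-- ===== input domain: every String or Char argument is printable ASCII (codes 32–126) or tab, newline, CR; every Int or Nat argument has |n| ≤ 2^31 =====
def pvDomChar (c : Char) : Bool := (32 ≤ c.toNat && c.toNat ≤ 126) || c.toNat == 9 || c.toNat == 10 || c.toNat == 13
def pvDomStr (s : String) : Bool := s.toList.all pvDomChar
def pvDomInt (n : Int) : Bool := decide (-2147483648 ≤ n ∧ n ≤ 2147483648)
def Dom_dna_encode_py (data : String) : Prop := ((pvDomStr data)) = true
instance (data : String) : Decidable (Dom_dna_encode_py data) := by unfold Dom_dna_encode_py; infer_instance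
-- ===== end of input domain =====

-- B replaces A's two passes (build a binary string, then rescan it in 2-bit slices
-- through a dict) by one pass over the characters extracting the four 2-bit groups
-- arithmetically; objective: alternative/simpler decomposition.

-- ===== PORT A =====

-- hand port of format(n, '08b') (PySem has no format): binary digits of n,
-- left-padded with '0' to width 8; exact for every n ≥ 0 (fuel n suffices since n/2 < n)
def pvBitsAux : Nat → Nat → List Char
  | 0, _ => []
  | fuel + 1, n =>
    if n = 0 then [] else pvBitsAux fuel (n / 2) ++ [if n % 2 = 1 then '1' else '0']

def pvFmt8 (n : Nat) : List Char :=
  let bits := pvBitsAux n n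
  List.replicate (8 - bits.length) '0' ++ bits

-- dna_mapping = {'00': 'A', '01': 'T', '10': 'G', '11': 'C'}
def pvDnaMapping : PySem.Dict (List Char) (List Char) :=
  PySem.Dict.ofList [(['0','0'], ['A']), (['0','1'], ['T']), (['1','0'], ['G']), (['1','1'], ['C'])]

-- dna_mapping[pair]; the KeyError branch (none) is unreachable: pairs consist of '0'/'1'
def pvLookup (pair : List Char) : List Char :=
  match PySem.Dict.get? pvDnaMapping pair with
  | some v => v
  | none => []

def dna_encode_py (data : String) : String :=
  -- binary_data = ''.join(format(ord(c), '08b') for c in data)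
  let binary_data : List Char := (data.toList.map (fun c => pvFmt8 c.toNat)).flatten
  -- if len(binary_data) % 2 != 0: binary_data += '0'
  let binary_data := if binary_data.length % 2 ≠ 0 then binary_data ++ ['0'] else binary_data
  -- for i in range(0, len(binary_data), 2): dna_sequence += dna_mapping[binary_data[i:i+2]]
  let dna_sequence : List Char :=
    (PySem.List.pyRange 0 (binary_data.length : Int) 2).foldl
      (fun acc i => acc ++ pvLookup (PySem.List.slice binary_data (some i) (some (i + 2)))) []
  String.ofList ('D' :: 'N' :: 'A' :: '_' :: dna_sequence)

-- ===== PORT B =====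

-- bases[k] for bases = "ATGC"; the IndexError branch is unreachable: k = _ & 3 < 4
def pvBase (k : Nat) : Char :=
  (PySem.List.pyGet? ['A', 'T', 'G', 'C'] (k : Int)).getD 'A'

def pvCode4 (n : Nat) : List Char :=
  [pvBase ((n >>> 6) &&& 3), pvBase ((n >>> 4) &&& 3), pvBase ((n >>> 2) &&& 3), pvBase (n &&& 3)]

def dna_encode_py_alt (data : String) : String :=
  let out : List Char := data.toList.foldl (fun acc c => acc ++ pvCode4 c.toNat) []
  String.ofList ('D' :: 'N' :: 'A' :: '_' :: out)

-- ===== PRECONDITION & SPEC =====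
def Spec_dna_encode_py (data : String) (out : String) : Prop := out = dna_encode_py_alt data
instance (data : String) (out : String) : Decidable (Spec_dna_encode_py data out) := by unfold Spec_dna_encode_py; infer_instance

-- ===== CLAIM (what is proved, stated in full; the proofs are below) =====
def Claim_equal_dna_encode_py : Prop := ∀ (data : String), Dom_dna_encode_py data → Spec_dna_encode_py data (dna_encode_py data)

-- ===== LEMMAS AND PROOFS =====

-- A's pair scan, expressed structurally: two characters at a time
def pvPairs : List Char → List Char
  | a :: b :: r => pvLookup [a, b] ++ pvPairs r
  | _ => []

lemma pvPairs_nil : pvPairs [] = [] := rfl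

lemma pvPairs_cons2 (a b : Char) (r : List Char) :
    pvPairs (a :: b :: r) = pvLookup [a, b] ++ pvPairs r := rfl

-- for every byte value < 128: format gives exactly 8 bits, and A's four dict
-- lookups on its bit pairs produce exactly B's four bases
set_option maxRecDepth 4000 in
lemma pvTable : ∀ n ∈ List.range 128, (pvFmt8 n).length = 8 ∧ pvPairs (pvFmt8 n) = pvCode4 n := by
  decide

lemma pvPairs_append (xs ys : List Char) (h : 2 ∣ xs.length) :
    pvPairs (xs ++ ys) = pvPairs xs ++ pvPairs ys := by
  induction xs using pvPairs.induct with
  | case1 a b r ih =>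
    simp only [List.cons_append, pvPairs_cons2, List.append_assoc]
    rw [ih (by simpa [Nat.add_mod] using h)]
  | case2 xs h2 =>
    match xs, h2 with
    | [], _ => simp [pvPairs_nil]
    | [a], h2 => simp at h
    | a :: b :: r, h2 => exact absurd rfl (h2 a b r)

-- joint induction: the joined binary string has even length, and A's pair scan
-- of it equals B's per-character codes
lemma pvMain (cs : List Char) (h : ∀ c ∈ cs, c.toNat < 128) :
    2 ∣ ((cs.map (fun c => pvFmt8 c.toNat)).flatten).length ∧
      pvPairs ((cs.map (fun c => pvFmt8 c.toNat)).flatten)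
        = cs.flatMap (fun c => pvCode4 c.toNat) := by
  induction cs with
  | nil => simp [pvPairs_nil]
  | cons a t ih =>
    have ha := pvTable a.toNat (by simp [List.mem_range]; exact h a (by simp))
    have iht := ih (fun c hc => h c (by simp [hc]))
    constructor
    · simp only [List.map_cons, List.flatten_cons, List.length_append, ha.1]
      omega
    · simp only [List.map_cons, List.flatten_cons, List.flatMap_cons]
      rw [pvPairs_append _ _ (by rw [ha.1]; omega), ha.2, iht.2]

-- range(0, 2m, 2) is the doubled naturals below m
lemma pvRange2 (m : Nat) :
    PySem.List.pyRange 0 ((2 * m : Nat) : Int) 2 = (List.range m).map (fun k => ((2 * k : Nat) : Int)) := by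
  rw [PySem.List.pyRange_of_pos 0 ((2 * m : Nat) : Int) (by norm_num)]
  have hc : (if (0 : Int) < ((2 * m : Nat) : Int)
      then ((((2 * m : Nat) : Int) - 0 + 2 - 1) / 2).toNat else 0) = m := by
    split <;> omega
  rw [hc]
  apply List.map_congr_left
  intro k _
  push_cast
  ring

-- A's foldl over range(0, 2m, 2) with slices is the structural pair scan
lemma pvLoopDT (m : Nat) : ∀ (bs : List Char) (acc : List Char), bs.length = 2 * m →
    (List.range m).foldl (fun acc k => acc ++ pvLookup ((bs.drop (2 * k)).take 2)) acc
      = acc ++ pvPairs bs := by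
  induction m with
  | zero =>
    intro bs acc h
    have : bs = [] := List.eq_nil_of_length_eq_zero (by omega)
    simp [this, pvPairs_nil]
  | succ m ih =>
    intro bs acc h
    match bs, h with
    | a :: b :: r, h =>
      rw [List.range_succ_eq_map]
      simp only [List.foldl_cons, List.foldl_map]
      have hfun : ∀ (acc' : List Char) (k : Nat),
          acc' ++ pvLookup (((a :: b :: r).drop (2 * (k + 1))).take 2)
            = acc' ++ pvLookup ((r.drop (2 * k)).take 2) := by
        intro acc' k
        have h2 : 2 * (k + 1) = (2 * k) + 1 + 1 := by omega
        rw [h2, List.drop_succ_cons, List.drop_succ_cons]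
      calc (List.range m).foldl
              (fun acc' k => acc' ++ pvLookup (((a :: b :: r).drop (2 * (k + 1))).take 2))
              (acc ++ pvLookup (((a :: b :: r).drop (2 * 0)).take 2))
          = (List.range m).foldl (fun acc' k => acc' ++ pvLookup ((r.drop (2 * k)).take 2))
              (acc ++ pvLookup [a, b]) := by
            rw [show (((a :: b :: r).drop (2 * 0)).take 2) = [a, b] by simp]
            exact List.foldl_ext _ _ _ (fun acc' k _ => hfun acc' k)
        _ = acc ++ pvPairs (a :: b :: r) := by
            rw [ih r _ (by simp only [List.length_cons] at h; omega), pvPairs_cons2, List.append_assoc]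

-- the slice form of the loop body equals the drop/take form
lemma pvSlice2 (bs : List Char) (k : Nat) :
    PySem.List.slice bs (some ((2 * k : Nat) : Int)) (some (((2 * k : Nat) : Int) + 2))
      = (bs.drop (2 * k)).take 2 := by
  rw [PySem.List.slice_toNat bs (by positivity) (by positivity)]
  have h1 : (((2 * k : Nat) : Int)).toNat = 2 * k := by omega
  have h2 : ((((2 * k : Nat) : Int)) + 2).toNat = 2 * k + 2 := by omega
  rw [h1, h2]
  congr 1
  omega

theorem dna_encode_py_spec : Claim_equal_dna_encode_py := by
  intro data hdom
  unfold Spec_dna_encode_py dna_encode_py dna_encode_py_alt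
  have h128 : ∀ c ∈ data.toList, c.toNat < 128 := by
    intro c hc
    have := List.all_eq_true.mp hdom c hc
    simp only [pvDomChar, Bool.or_eq_true, Bool.and_eq_true, decide_eq_true_eq, beq_iff_eq] at this
    omega
  obtain ⟨heven, hpairs⟩ := pvMain data.toList h128
  obtain ⟨m, hm⟩ := heven
  simp only
  rw [if_neg (by omega)]
  rw [hm, pvRange2, List.foldl_map]
  have hfun : ∀ (acc : List Char) (k : Nat),
      acc ++ pvLookup (PySem.List.slice ((data.toList.map (fun c => pvFmt8 c.toNat)).flatten)
          (some ((2 * k : Nat) : Int)) (some (((2 * k : Nat) : Int) + 2)))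
        = acc ++ pvLookup ((((data.toList.map (fun c => pvFmt8 c.toNat)).flatten).drop (2 * k)).take 2) := by
    intro acc k
    rw [pvSlice2]
  rw [PySem.List.foldl_congr_mem _ _ _ _ (fun acc k _ => hfun acc k)]
  rw [pvLoopDT m _ [] hm, List.nil_append, hpairs]
  rw [PySem.List.foldl_append_eq_flatMap, List.nil_append]
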